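-- pv_equiv track=rewrite | github.com/harshakadapala-17/Hallucination-Aware-LLMS | modules/query_analyzer.py | _count_capitalized_sequences
-- ===== SOURCE A (Python) =====
-- import string
-- from typing import Any, Dict, List
--
-- def _count_capitalized_sequences(text: str) -> int:
--     """Regex-based entity count fallback."""
--     tokens = text.split()
--     count = 0
--     i = 0
--     while i < len(tokens):
--         clean = tokens[i].strip(string.punctuation)
--         if clean and clean[0].isupper() and not _is_sentence_start(tokens, i):
--             count += 1
--             while (
--                 i + 1 < len(tokens)
--                 and tokens[i + 1].strip(string.punctuation)[:1].isupper()
--             ):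
--                 i += 1
--         i += 1
--     return count
--
-- def _is_sentence_start(tokens: List[str], idx: int) -> bool:
--     if idx == 0:
--         return True
--     return tokens[idx - 1].endswith((".", "!", "?"))
-- ===== SOURCE B (Python) =====
-- import string
--
--
-- def _count_capitalized_sequences(text: str) -> int:
--     """Single linear pass: precompute per-token capitalization, then fold with a
--     counted-this-run flag instead of nested index-skipping loops."""
--     tokens = text.split()
--     cap = [tok.strip(string.punctuation)[:1].isupper() for tok in tokens]
--     nonstart = [False] + [not t.endswith((".", "!", "?")) for t in tokens[:-1]]
--     count = 0
--     counted = False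
--     for c, ns in zip(cap, nonstart):
--         if c:
--             if not counted and ns:
--                 count += 1
--                 counted = True
--         else:
--             counted = False
--     return count
-- ===== Notes on version B (the rewrite author's own statement) =====
-- stated objective: simpler
-- what changed: Replaced the nested index-jumping while-loops with precomputed per-token capitalization and non-sentence-start lists and a single fold carrying a counted-this-run flag.
import Mathlib
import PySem

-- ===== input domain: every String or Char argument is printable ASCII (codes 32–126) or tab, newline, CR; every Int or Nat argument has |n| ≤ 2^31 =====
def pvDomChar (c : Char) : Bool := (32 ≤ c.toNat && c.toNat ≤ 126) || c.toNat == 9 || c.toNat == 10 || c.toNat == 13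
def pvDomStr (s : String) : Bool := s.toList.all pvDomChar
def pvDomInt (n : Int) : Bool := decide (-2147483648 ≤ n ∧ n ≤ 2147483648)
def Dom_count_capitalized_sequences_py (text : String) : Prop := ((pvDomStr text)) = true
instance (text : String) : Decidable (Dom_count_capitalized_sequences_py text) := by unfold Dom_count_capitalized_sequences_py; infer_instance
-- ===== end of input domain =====

-- B replaces A's nested index-jumping while-loops by precomputed per-token flag lists and one
-- linear fold with a counted-this-run flag (objective: simpler; same asymptotic cost).


-- ===== PORT A =====

-- string.punctuation
def pvPunct : String := "!\"#$%&'()*+,-./:;<=>?@[\\]^_`{|}~"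

-- str.isupper() applied to a string of length ≤ 1 (exact there: '' is not upper,
-- a single ASCII char is upper iff the char is an uppercase letter).
def pvIsupper1 (cs : List Char) : Bool :=
  match cs with
  | [] => false
  | c :: _ => PySem.Chars.isupper c

-- t.endswith((".", "!", "?"))
def pvEndsSent (t : String) : Bool :=
  PySem.Str.endswith t "." || PySem.Str.endswith t "!" || PySem.Str.endswith t "?"

-- _is_sentence_start(tokens, idx); idx is A's loop counter, always a valid index,
-- so tokens[idx-1] is read with getD (in range: exact).
def pvIsSentenceStart (tokens : List String) (idx : Nat) : Bool :=
  if idx = 0 then true else pvEndsSent (tokens.getD (idx - 1) "")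

-- tok.strip(string.punctuation)[:1].isupper()  (A's inner-while test, B's cap test)
def pvCapA (t : String) : Bool :=
  pvIsupper1 (PySem.Chars.slice (PySem.Chars.stripChars t.toList pvPunct.toList) none (some 1))

-- A's inner while loop: advance i while tokens[i+1].strip(punct)[:1].isupper()
def pvSkip (ts : List String) (i : Nat) : Nat :=
  if i + 1 < ts.length ∧ pvCapA (ts.getD (i + 1) "") then pvSkip ts (i + 1) else i
termination_by ts.length - i
decreasing_by omega

theorem le_pvSkip (ts : List String) (i : Nat) : i ≤ pvSkip ts i := by
  unfold pvSkip
  split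
  · have := le_pvSkip ts (i + 1); omega
  · exact le_rfl
termination_by ts.length - i
decreasing_by omega

-- A's outer while loop over the index i with the count accumulator
def pvLoopA (ts : List String) (i : Nat) (count : Int) : Int :=
  if i < ts.length then
    -- clean = tokens[i].strip(string.punctuation), read in range under the guard;
    -- 'clean and clean[0].isupper() and not _is_sentence_start(tokens, i)'
    if pvIsupper1 (PySem.Chars.stripChars (ts.getD i "").toList pvPunct.toList)
        && !pvIsSentenceStart ts i then
      pvLoopA ts (pvSkip ts i + 1) (count + 1)
    else
      pvLoopA ts (i + 1) count
  else count
termination_by ts.length - i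
decreasing_by
  · have := le_pvSkip ts i; omega
  · omega

def count_capitalized_sequences_py (text : String) : Int :=
  pvLoopA (PySem.Str.split₀ text) 0 0

-- ===== PORT B =====

-- nonstart = [False] + [not t.endswith((".", "!", "?")) for t in tokens[:-1]]
def pvNonstart (tokens : List String) : List Bool :=
  false :: (PySem.List.slice tokens none (some (-1))).map (fun t => !pvEndsSent t)

-- the fold over zip(cap, nonstart) with state (count, counted)
def pvFoldB : List (Bool × Bool) → Int → Bool → Int
  | [], count, _ => count
  | (c, ns) :: rest, count, counted =>
    if c then
      if !counted && ns then pvFoldB rest (count + 1) true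
      else pvFoldB rest count counted
    else pvFoldB rest count false

def count_capitalized_sequences_py_alt (text : String) : Int :=
  let tokens := PySem.Str.split₀ text
  let cap := tokens.map pvCapA
  pvFoldB (cap.zip (pvNonstart tokens)) 0 false

-- ===== PRECONDITION & SPEC =====
def Spec_count_capitalized_sequences_py (text : String) (out : Int) : Prop := out = count_capitalized_sequences_py_alt text
instance (text : String) (out : Int) : Decidable (Spec_count_capitalized_sequences_py text out) := by unfold Spec_count_capitalized_sequences_py; infer_instance

-- ===== CLAIM (what is proved, stated in full; the proofs are below) =====
def Claim_equal_count_capitalized_sequences_py : Prop := ∀ (text : String), Dom_count_capitalized_sequences_py text → Spec_count_capitalized_sequences_py text (count_capitalized_sequences_py text)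

-- ===== LEMMAS AND PROOFS =====

-- the pair list B folds over
def pvP (ts : List String) : List (Bool × Bool) :=
  (ts.map pvCapA).zip (false :: ts.dropLast.map (fun t => !pvEndsSent t))

theorem pvSlice_dropLast (ts : List String) :
    PySem.List.slice ts none (some (-1)) = ts.dropLast := by
  simp [pysem]

theorem pvP_length (ts : List String) : (pvP ts).length ≤ ts.length := by
  simp [pvP]

theorem pvCapA_strip (t : String) :
    pvIsupper1 (PySem.Chars.stripChars t.toList pvPunct.toList) = pvCapA t := by
  unfold pvCapA
  have h : PySem.Chars.slice (PySem.Chars.stripChars t.toList pvPunct.toList) none (some 1)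
      = (PySem.Chars.stripChars t.toList pvPunct.toList).take 1 := by simp [pysem]
  rw [h]
  cases PySem.Chars.stripChars t.toList pvPunct.toList <;> simp [pvIsupper1]

theorem pvP_drop (ts : List String) (i : Nat) (h : i < ts.length) :
    (pvP ts).drop i =
      (pvCapA ts[i], (decide (i ≠ 0) && !pvEndsSent (ts.getD (i - 1) ""))) :: (pvP ts).drop (i + 1) := by
  have hlen : i < (pvP ts).length := by
    simp [pvP]
    cases ts with
    | nil => simp at h
    | cons a l => simp at h ⊢; omega
  rw [List.drop_eq_getElem_cons hlen]
  congr 1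
  have h3 : i < (false :: ts.dropLast.map (fun t => !pvEndsSent t)).length := by
    simp; cases ts with
    | nil => simp at h
    | cons a l => simp at h ⊢; omega
  show ((ts.map pvCapA).zip _)[i] = _
  rw [List.getElem_zip]
  refine Prod.ext ?_ ?_
  · simp
  · cases i with
    | zero => simp
    | succ j =>
      simp only [List.getElem_cons_succ, List.getElem_map]
      have hj : j < ts.dropLast.length := by simp at h3 ⊢; omega
      rw [List.getElem_dropLast]
      simp [List.getD_eq_getElem?_getD, List.getElem?_eq_getElem (by omega : j < ts.length)]

theorem pvP_drop_len (ts : List String) (i : Nat) (h : ts.length ≤ i) : (pvP ts).drop i = [] :=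
  List.drop_eq_nil_of_le (le_trans (pvP_length ts) h)

theorem pvGetD_eq (ts : List String) (i : Nat) (h : i < ts.length) : ts.getD i "" = ts[i] :=
  List.getD_eq_getElem ts "" h

theorem pvNotStart (ts : List String) (i : Nat) :
    (!pvIsSentenceStart ts i) = (decide (i ≠ 0) && !pvEndsSent (ts.getD (i - 1) "")) := by
  unfold pvIsSentenceStart
  by_cases h : i = 0 <;> simp [h]

theorem pvFoldB_skip_head (c ns : Bool) (l : List (Bool × Bool)) (count : Int)
    (h : (c && ns) = false) : pvFoldB ((c, ns) :: l) count false = pvFoldB l count false := by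
  cases c <;> cases ns <;> simp_all [pvFoldB]

theorem pvFoldB_shift (l : List (Bool × Bool)) (count : Int) (b : Bool) :
    pvFoldB l count b = count + pvFoldB l 0 b := by
  induction l generalizing count b with
  | nil => simp [pvFoldB]
  | cons p rest ih =>
    obtain ⟨c, ns⟩ := p
    simp only [pvFoldB]
    split_ifs <;> rw [ih] <;> first
      | rfl
      | (rw [ih (0 + 1)]; ring)

theorem pvSkip_fold (ts : List String) (i : Nat) (count : Int) (h : i < ts.length) :
    pvFoldB ((pvP ts).drop (i + 1)) count true = pvFoldB ((pvP ts).drop (pvSkip ts i + 1)) count false := by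
  rw [pvSkip]
  by_cases hc : i + 1 < ts.length ∧ pvCapA (ts.getD (i + 1) "") = true
  · obtain ⟨h1, h2⟩ := hc
    rw [if_pos ⟨h1, h2⟩, pvP_drop ts (i + 1) h1]
    rw [pvGetD_eq ts (i + 1) h1] at h2
    simp only [pvFoldB, h2, if_true, Bool.not_true, Bool.false_and]
    exact pvSkip_fold ts (i + 1) count h1
  · rw [if_neg hc]
    by_cases hl : i + 1 < ts.length
    · have h2 : pvCapA (ts.getD (i + 1) "") = false := by
        revert hc; cases hx : pvCapA (ts.getD (i + 1) "") <;> simp_all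
      rw [pvGetD_eq ts (i + 1) hl] at h2
      rw [pvP_drop ts (i + 1) hl]
      simp [pvFoldB, h2]
    · rw [pvP_drop_len ts (i + 1) (by omega)]
      simp [pvFoldB]
termination_by ts.length - i
decreasing_by omega

theorem pvMain (ts : List String) (i : Nat) (count : Int) :
    pvLoopA ts i count = count + pvFoldB ((pvP ts).drop i) 0 false := by
  rw [pvLoopA]
  by_cases h : i < ts.length
  · rw [if_pos h, pvP_drop ts i h]
    have hcap : pvIsupper1 (PySem.Chars.stripChars (ts.getD i "").toList pvPunct.toList)
        = pvCapA ts[i] := by rw [pvCapA_strip, pvGetD_eq ts i h]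
    rw [hcap, pvNotStart]
    by_cases hb : (pvCapA ts[i] && (decide (i ≠ 0) && !pvEndsSent (ts.getD (i - 1) ""))) = true
    · obtain ⟨hc, hn⟩ := Bool.and_eq_true_iff.mp hb
      rw [if_pos hb]
      rw [pvMain ts (pvSkip ts i + 1) (count + 1)]
      simp only [pvFoldB, hc, hn, if_true, Bool.not_false, Bool.true_and]
      rw [pvFoldB_shift _ (0 + 1) true, pvSkip_fold ts i 0 h]
      ring
    · rw [if_neg hb]
      rw [pvMain ts (i + 1) count]
      rw [pvFoldB_skip_head _ _ _ _ (Bool.not_eq_true _ ▸ hb)]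
  · rw [if_neg h, pvP_drop_len ts i (by omega)]
    simp [pvFoldB]
termination_by ts.length - i
decreasing_by
  · have := le_pvSkip ts i; omega
  · omega

-- ===== VERDICT (by name: the statement is the Claim_ definition above) =====
theorem count_capitalized_sequences_py_spec : Claim_equal_count_capitalized_sequences_py := by
  intro text _
  unfold Spec_count_capitalized_sequences_py count_capitalized_sequences_py count_capitalized_sequences_py_alt
  have := pvMain (PySem.Str.split₀ text) 0 0
  simpa [pvP, pvNonstart, pvSlice_dropLast] using this
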